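-- pv_equiv track=rewrite | github.com/kat-rin07/Final-Project | functions.py | dorm_with_most_cases
-- ===== SOURCE A (Python) =====
-- def dorm_with_most_cases(dorm_count:dict):
--     top_dorm = []
--     top_dorm_count = 0
--     for dorm in dorm_count:
--         if dorm_count[dorm] > top_dorm_count:
--             top_dorm_count = dorm_count[dorm]
--             top_dorm = [dorm]
--         elif dorm_count[dorm] ==  top_dorm_count:
--             top_dorm.append(dorm)
--
--     return top_dorm, top_dorm_count
-- ===== SOURCE B (Python) =====
-- def dorm_with_most_cases(dorm_count: dict):
--     top_dorm_count = max([0, *dorm_count.values()])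
--     top_dorm = [d for d in dorm_count if dorm_count[d] == top_dorm_count]
--     return top_dorm, top_dorm_count
-- ===== Notes on version B (the rewrite author's own statement) =====
-- stated objective: simpler
-- what changed: Replaces A's single accumulating pass with running max/tie-list state by a two-pass decomposition: compute the target count as max([0, *values]) (the 0 seed matches A's initializer), then collect the tied dorms with one filtering comprehension.
import Mathlib
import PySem

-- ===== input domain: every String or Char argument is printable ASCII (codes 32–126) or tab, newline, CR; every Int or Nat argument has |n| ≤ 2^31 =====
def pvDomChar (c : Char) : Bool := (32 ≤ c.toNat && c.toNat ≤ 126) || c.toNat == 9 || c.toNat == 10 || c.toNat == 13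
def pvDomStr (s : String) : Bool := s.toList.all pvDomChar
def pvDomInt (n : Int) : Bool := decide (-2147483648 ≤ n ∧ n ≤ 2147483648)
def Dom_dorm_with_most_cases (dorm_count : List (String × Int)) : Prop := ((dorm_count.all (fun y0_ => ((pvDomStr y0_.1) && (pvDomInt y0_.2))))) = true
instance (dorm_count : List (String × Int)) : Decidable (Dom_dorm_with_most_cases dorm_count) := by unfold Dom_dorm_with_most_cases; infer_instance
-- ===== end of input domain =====

-- B computes the maximum first (seeded with 0 like A's initializer) and filters the tied dorms
-- in a second pass, instead of A's single pass with running max / tie-list state.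

-- ===== PORT A =====
-- dict lookup dorm_count[dorm]: first match in the association list (key always present here)
def pvLookup (dc : List (String × Int)) (k : String) : Int :=
  ((dc.find? (fun q => q.1 == k)).map Prod.snd).getD 0

def dorm_with_most_cases (dorm_count : List (String × Int)) : List String × Int :=
  (dorm_count.map Prod.fst).foldl
    (fun acc dorm =>
      if pvLookup dorm_count dorm > acc.2 then ([dorm], pvLookup dorm_count dorm)
      else if pvLookup dorm_count dorm = acc.2 then (acc.1 ++ [dorm], acc.2)
      else acc)
    ([], 0)

-- ===== PORT B =====
def dorm_with_most_cases_alt (dorm_count : List (String × Int)) : List String × Int :=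
  let top_dorm_count := (dorm_count.map Prod.snd).foldl max 0  -- max([0, *values])
  let top_dorm := (dorm_count.map Prod.fst).filter (fun d => pvLookup dorm_count d = top_dorm_count)
  (top_dorm, top_dorm_count)

-- ===== PRECONDITION & SPEC =====
-- Pre_ restricts to association lists with pairwise-distinct keys: the argument represents a
-- Python dict, whose keys are necessarily unique, so no input A actually accepts is excluded.
def Pre_dorm_with_most_cases (dorm_count : List (String × Int)) : Prop :=
  (dorm_count.map Prod.fst).Nodup

instance (dorm_count : List (String × Int)) : Decidable (Pre_dorm_with_most_cases dorm_count) := by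
  unfold Pre_dorm_with_most_cases; infer_instance

def pvWitness_dorm_with_most_cases : (List (String × Int)) := [("North", 3), ("South", 3), ("East", 1)]

def Spec_dorm_with_most_cases (dorm_count : List (String × Int)) (out : List String × Int) : Prop := out = dorm_with_most_cases_alt dorm_count
instance (dorm_count : List (String × Int)) (out : List String × Int) : Decidable (Spec_dorm_with_most_cases dorm_count out) := by unfold Spec_dorm_with_most_cases; infer_instance

-- ===== CLAIM (what is proved, stated in full; the proofs are below) =====
def Claim_equal_dorm_with_most_cases : Prop := ∀ (dorm_count : List (String × Int)), Dom_dorm_with_most_cases dorm_count → Pre_dorm_with_most_cases dorm_count → Spec_dorm_with_most_cases dorm_count (dorm_with_most_cases dorm_count)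

-- ===== LEMMAS AND PROOFS =====

theorem foldl_max_init_le (xs : List Int) (b : Int) : b ≤ xs.foldl max b := by
  induction xs generalizing b with
  | nil => exact le_refl b
  | cons x xs ih => exact le_trans (le_max_left b x) (ih (max b x))

theorem mem_le_foldl_max (xs : List Int) (b x : Int) (hx : x ∈ xs) : x ≤ xs.foldl max b := by
  induction xs generalizing b with
  | nil => cases hx
  | cons y ys ih =>
    rcases List.mem_cons.mp hx with h | h
    · subst h; exact le_trans (le_max_right b x) (foldl_max_init_le ys (max b x))
    · exact ih (max b y) h

-- under Nodup keys, looking up the key of a member pair yields its own value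
theorem pvLookup_of_mem (dc : List (String × Int)) (hnd : (dc.map Prod.fst).Nodup)
    (p : String × Int) (hp : p ∈ dc) : pvLookup dc p.1 = p.2 := by
  induction dc with
  | nil => cases hp
  | cons q l ih =>
    simp only [List.map_cons, List.nodup_cons] at hnd
    rcases List.mem_cons.mp hp with h | h
    · subst h
      simp [pvLookup, List.find?]
    · have hne : q.1 ≠ p.1 := by
        intro he
        exact hnd.1 (he ▸ (List.mem_map.mpr ⟨p, h, rfl⟩))
      have : (q.1 == p.1) = false := by
        simp [hne]
      simp only [pvLookup, List.find?, this]
      exact ih hnd.2 h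

-- core invariant: A's fold over the pairs equals (ties with the running max, running max)
theorem core (l : List (String × Int)) :
    l.foldl (fun acc (p : String × Int) =>
        if p.2 > acc.2 then ([p.1], p.2)
        else if p.2 = acc.2 then (acc.1 ++ [p.1], acc.2)
        else acc) (([] : List String), (0 : Int))
    = ((l.filter (fun p => p.2 = (l.map Prod.snd).foldl max 0)).map Prod.fst,
       (l.map Prod.snd).foldl max 0) := by
  induction l using List.reverseRecOn with
  | nil => simp
  | append_singleton l p ih =>
    rw [List.foldl_append, ih]
    have hb : ∀ q ∈ l, q.2 ≤ (l.map Prod.snd).foldl max 0 := fun q hq =>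
      mem_le_foldl_max _ _ _ (List.mem_map.mpr ⟨q, hq, rfl⟩)
    simp only [List.foldl_cons, List.foldl_nil, List.map_append, List.foldl_append,
      List.filter_append, List.map_cons, List.map_nil]
    by_cases h1 : p.2 > (l.map Prod.snd).foldl max 0
    · have hmax : max ((l.map Prod.snd).foldl max 0) p.2 = p.2 := max_eq_right (le_of_lt h1)
      simp only [h1, hmax, if_true]
      simp
      intro a b hab
      exact ne_of_lt (lt_of_le_of_lt (hb (a, b) hab) h1)
    · have hle : p.2 ≤ (l.map Prod.snd).foldl max 0 := le_of_not_gt h1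
      have hmax : max ((l.map Prod.snd).foldl max 0) p.2 = (l.map Prod.snd).foldl max 0 :=
        max_eq_left hle
      by_cases h2 : p.2 = (l.map Prod.snd).foldl max 0
      · simp [h2]
      · simp [h1, h2, hmax, List.filter]

-- ===== VERDICT (by name: the statement is the Claim_ definition above) =====
theorem dorm_with_most_cases_spec : Claim_equal_dorm_with_most_cases := by
  intro dc _ hpre
  unfold Spec_dorm_with_most_cases dorm_with_most_cases dorm_with_most_cases_alt
  -- rewrite A's fold over the keys (with lookups) into a fold over the pairs
  rw [List.foldl_map]
  have hA : dc.foldl (fun acc (p : String × Int) =>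
      if pvLookup dc p.1 > acc.2 then ([p.1], pvLookup dc p.1)
      else if pvLookup dc p.1 = acc.2 then (acc.1 ++ [p.1], acc.2)
      else acc) (([] : List String), (0 : Int))
      = dc.foldl (fun acc (p : String × Int) =>
      if p.2 > acc.2 then ([p.1], p.2)
      else if p.2 = acc.2 then (acc.1 ++ [p.1], acc.2)
      else acc) (([] : List String), (0 : Int)) := by
    apply PySem.List.foldl_congr_mem
    intro acc p hp
    rw [pvLookup_of_mem dc hpre p hp]
  rw [hA, core]
  -- rewrite B's filter over the keys (with lookups) into a filter over the pairs
  have hB : (dc.map Prod.fst).filter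
        (fun d => pvLookup dc d = (dc.map Prod.snd).foldl max 0)
      = (dc.filter (fun p => p.2 = (dc.map Prod.snd).foldl max 0)).map Prod.fst := by
    rw [List.filter_map]
    congr 1
    apply List.filter_congr
    intro p hp
    simp only [Function.comp_apply]
    rw [pvLookup_of_mem dc hpre p hp]
  simp only [hB]
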